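-- pv_equiv track=rewrite | github.com/sanandans/puzzles | 271ibmponder_Nov2022/pondthisnov22_sol.py | count_sols_squareD
-- ===== SOURCE A (Python) =====
-- import math
--
-- LIM=99
--
-- TGTSOLS=16
--
-- def count_sols_squareD(given_d, given_n):
--     #(sqrt_dy+x)(sqrt_dy-x)=n=j*i, j>i
--     #y=(f)
--     #b=(x+1)2, a=(y+1)/2, so x,y have to be odd.
--     #y=(j+i)/2sqrt_d, x=(j-i)/2.
--     sqrt_d = int(math.sqrt(given_d) + 0.5)
--     paircnt=0
--     #given_d is square, so given_n is not
--     for i in range(1,int(math.sqrt(given_n) + 2)):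
--         if given_n%i == 0:
--             j=given_n//i
--             if (j>i) and ((j-i)%2 == 0) and ( ((j-i)//2)%2 == 1 ) and ((j+i)%(2*sqrt_d) == 0) and ( ((j+i)//(2*sqrt_d))%2 == 1 ):
--                 x=(j-i)//2
--                 y=(j+i)//(2*sqrt_d)
--                 b=(x+1)//2
--                 a=(y+1)//2
--                 if (b > 1) and (a>0) and (b < 10**LIM):
--                     paircnt += 1
--                     if paircnt > TGTSOLS:
--                         break
--     if paircnt == TGTSOLS:
--         return True
--     else:
--         return False
-- ===== SOURCE B (Python) =====
-- import math
--
-- def count_sols_squareD(given_d, given_n):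
--     r = math.isqrt(given_d)
--     sqrt_d = r if given_d - r * r <= r else r + 1
--     if given_n <= 0:
--         return False
--     # factorize given_n, then enumerate its divisors from the prime factorization
--     fac = []
--     m = given_n
--     p = 2
--     while p * p <= m:
--         if m % p == 0:
--             e = 0
--             while m % p == 0:
--                 m //= p
--                 e += 1
--             fac.append((p, e))
--         p += 1
--     if m > 1:
--         fac.append((m, 1))
--     divs = [1]
--     for (p, e) in fac:
--         divs = [d * p ** k for d in divs for k in range(e + 1)]
--     cnt = 0
--     for i in divs:
--         j = given_n // i
--         if j > i and (j - i) % 4 == 2 and (j + i) % (2 * sqrt_d) == 0 and ((j + i) // (2 * sqrt_d)) % 2 == 1: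
--             x = (j - i) // 2
--             y = (j + i) // (2 * sqrt_d)
--             b = (x + 1) // 2
--             a = (y + 1) // 2
--             if b > 1 and a > 0 and b < 10 ** 99:
--                 cnt += 1
--     return cnt == 16
-- ===== Notes on version B (the rewrite author's own statement) =====
-- stated objective: alternative
-- what changed: B finds the candidate pairs by fully factorizing given_n by trial division and generating all divisors as products over the prime-power ranges, then counts the qualifying divisors with a fused parity test ((j-i)%4==2) and no early break, instead of A's scan of every integer up to sqrt(n) with a divisibility test and a break-capped counter.
-- outside the precondition, e.g. on count_sols_squareD(0, 1): A returns False, B returns False; on count_sols_squareD(0, 3): A raises ZeroDivisionError, B raises ZeroDivisionError; on count_sols_squareD(-1, 5): A raises ValueError, B raises ValueError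
import Mathlib
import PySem

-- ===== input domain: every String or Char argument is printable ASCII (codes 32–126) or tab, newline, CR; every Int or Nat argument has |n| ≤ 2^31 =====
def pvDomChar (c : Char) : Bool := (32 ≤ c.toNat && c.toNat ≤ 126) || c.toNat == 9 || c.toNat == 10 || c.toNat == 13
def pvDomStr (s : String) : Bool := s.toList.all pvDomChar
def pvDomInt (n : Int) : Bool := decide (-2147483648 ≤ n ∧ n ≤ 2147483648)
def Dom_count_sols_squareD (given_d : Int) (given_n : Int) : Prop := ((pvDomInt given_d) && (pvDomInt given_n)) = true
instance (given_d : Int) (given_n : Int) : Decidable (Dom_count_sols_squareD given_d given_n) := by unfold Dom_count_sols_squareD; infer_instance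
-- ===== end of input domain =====

-- B enumerates candidate divisors from a trial-division prime factorization (products over
-- prime-power ranges) with a fused parity test and no early break, instead of A's scan of
-- every integer up to sqrt(n); objective: alternative (same worst-case cost).


-- ===== PORT A =====
-- the for-loop with its break, carrying paircnt; returns the final paircnt
def goA (n s : Int) : List Int → Int → Int
  | [], c => c
  | i :: rest, c =>
    if PySem.Int.mod n i = 0 then
      let j := PySem.Int.floordiv n i
      if j > i ∧ PySem.Int.mod (j - i) 2 = 0 ∧ PySem.Int.mod (PySem.Int.floordiv (j - i) 2) 2 = 1 ∧
          PySem.Int.mod (j + i) (2 * s) = 0 ∧ PySem.Int.mod (PySem.Int.floordiv (j + i) (2 * s)) 2 = 1 then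
        let x := PySem.Int.floordiv (j - i) 2
        let y := PySem.Int.floordiv (j + i) (2 * s)
        let b := PySem.Int.floordiv (x + 1) 2
        let a := PySem.Int.floordiv (y + 1) 2
        if b > 1 ∧ a > 0 ∧ b < 10 ^ 99 then
          if c + 1 > 16 then c + 1 else goA n s rest (c + 1)
        else goA n s rest c
      else goA n s rest c
    else goA n s rest c

def count_sols_squareD (given_d : Int) (given_n : Int) : Bool :=
  -- int(math.sqrt(given_d) + 0.5): hand port of the float expression, exact on Dom (0 ≤ given_d ≤ 2^31):
  -- it is the integer nearest to √given_d (ties cannot occur for integer given_d)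
  let r : Int := (Nat.sqrt given_d.toNat : Int)
  let sqrt_d : Int := if given_d - r * r ≤ r then r else r + 1
  -- int(math.sqrt(given_n) + 2): hand port, exact on Dom (0 ≤ given_n ≤ 2^31): isqrt(given_n) + 2
  let paircnt := goA given_n sqrt_d (PySem.List.pyRange 1 ((Nat.sqrt given_n.toNat : Int) + 2) 1) 0
  paircnt == 16

-- ===== PORT B =====
-- inner `while m % p == 0: m //= p; e += 1`; returns (e, final m).
-- fuel-structured recursion: m.toNat steps always suffice (m shrinks every iteration)
def stripGo (p : Int) : Nat → Int → Int × Int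
  | 0, m => (0, m)
  | fuel + 1, m =>
    if PySem.Int.mod m p = 0 then
      let r := stripGo p fuel (PySem.Int.floordiv m p)
      (r.1 + 1, r.2)
    else (0, m)

def stripP (p m : Int) : Int × Int := stripGo p m.toNat m

-- outer `while p * p <= m` trial-division loop plus the trailing `if m > 1` append.
-- fuel-structured recursion: (m + 1 - p).toNat steps always suffice
def facGo : Nat → Int → Int → List (Int × Int)
  | 0, m, _ => if 1 < m then [(m, 1)] else []
  | fuel + 1, m, p =>
    if p * p ≤ m then
      if PySem.Int.mod m p = 0 then
        (p, (stripP p m).1) :: facGo fuel (stripP p m).2 (p + 1)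
      else facGo fuel m (p + 1)
    else if 1 < m then [(m, 1)] else []

def facLoop (m p : Int) : List (Int × Int) := facGo (m + 1 - p).toNat m p

-- `divs = [d * p ** k for d in divs for k in range(e + 1)]`
def divsStep (divs : List Int) (pe : Int × Int) : List Int :=
  divs.flatMap (fun d0 => (PySem.List.pyRange 0 (pe.2 + 1) 1).map (fun k => d0 * pe.1 ^ k.toNat))

def count_sols_squareD_alt (given_d : Int) (given_n : Int) : Bool :=
  -- r = math.isqrt(given_d); exact for 0 ≤ given_d
  let r : Int := (Nat.sqrt given_d.toNat : Int)
  let sqrt_d : Int := if given_d - r * r ≤ r then r else r + 1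
  if given_n ≤ 0 then false
  else
    let fac := facLoop given_n 2
    let divs := fac.foldl divsStep [1]
    let cnt := divs.foldl (fun c i =>
      let j := PySem.Int.floordiv given_n i
      if j > i ∧ PySem.Int.mod (j - i) 4 = 2 ∧ PySem.Int.mod (j + i) (2 * sqrt_d) = 0 ∧
          PySem.Int.mod (PySem.Int.floordiv (j + i) (2 * sqrt_d)) 2 = 1 then
        let x := PySem.Int.floordiv (j - i) 2
        let y := PySem.Int.floordiv (j + i) (2 * sqrt_d)
        let b := PySem.Int.floordiv (x + 1) 2
        let a := PySem.Int.floordiv (y + 1) 2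
        if b > 1 ∧ a > 0 ∧ b < 10 ^ 99 then c + 1 else c
      else c) (0 : Int)
    cnt == 16

-- ===== PRECONDITION & SPEC =====
-- Pre_ excludes given_d < 0 and given_n < 0 (math.sqrt raises ValueError) and given_d = 0
-- (A raises ZeroDivisionError whenever some divisor pair passes the parity tests; on the
-- remaining given_d = 0 inputs A and B both return False, so only crashes are excluded in spirit).
def Pre_count_sols_squareD (given_d : Int) (given_n : Int) : Prop := 1 ≤ given_d ∧ 0 ≤ given_n
instance (given_d : Int) (given_n : Int) : Decidable (Pre_count_sols_squareD given_d given_n) := by unfold Pre_count_sols_squareD; infer_instance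
def pvWitness_count_sols_squareD : Int × Int := (9, 100)

def Spec_count_sols_squareD (given_d : Int) (given_n : Int) (out : Bool) : Prop := out = count_sols_squareD_alt given_d given_n
instance (given_d : Int) (given_n : Int) (out : Bool) : Decidable (Spec_count_sols_squareD given_d given_n out) := by unfold Spec_count_sols_squareD; infer_instance

-- ===== CLAIM (what is proved, stated in full; the proofs are below) =====
def Claim_equal_count_sols_squareD : Prop := ∀ (given_d : Int) (given_n : Int), Dom_count_sols_squareD given_d given_n → Pre_count_sols_squareD given_d given_n → Spec_count_sols_squareD given_d given_n (count_sols_squareD given_d given_n)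

-- ===== LEMMAS AND PROOFS =====

-- A's full per-element test, as a single decidable conjunction
def condA (s n i : Int) : Bool :=
  decide (PySem.Int.mod n i = 0 ∧ PySem.Int.floordiv n i > i ∧
    PySem.Int.mod (PySem.Int.floordiv n i - i) 2 = 0 ∧
    PySem.Int.mod (PySem.Int.floordiv (PySem.Int.floordiv n i - i) 2) 2 = 1 ∧
    PySem.Int.mod (PySem.Int.floordiv n i + i) (2 * s) = 0 ∧
    PySem.Int.mod (PySem.Int.floordiv (PySem.Int.floordiv n i + i) (2 * s)) 2 = 1 ∧
    PySem.Int.floordiv (PySem.Int.floordiv (PySem.Int.floordiv n i - i) 2 + 1) 2 > 1 ∧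
    PySem.Int.floordiv (PySem.Int.floordiv (PySem.Int.floordiv n i + i) (2 * s) + 1) 2 > 0 ∧
    PySem.Int.floordiv (PySem.Int.floordiv (PySem.Int.floordiv n i - i) 2 + 1) 2 < 10 ^ 99)

-- B's full per-element test
def condB (s n i : Int) : Bool :=
  decide (PySem.Int.floordiv n i > i ∧ PySem.Int.mod (PySem.Int.floordiv n i - i) 4 = 2 ∧
    PySem.Int.mod (PySem.Int.floordiv n i + i) (2 * s) = 0 ∧
    PySem.Int.mod (PySem.Int.floordiv (PySem.Int.floordiv n i + i) (2 * s)) 2 = 1 ∧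
    PySem.Int.floordiv (PySem.Int.floordiv (PySem.Int.floordiv n i - i) 2 + 1) 2 > 1 ∧
    PySem.Int.floordiv (PySem.Int.floordiv (PySem.Int.floordiv n i + i) (2 * s) + 1) 2 > 0 ∧
    PySem.Int.floordiv (PySem.Int.floordiv (PySem.Int.floordiv n i - i) 2 + 1) 2 < 10 ^ 99)

-- goA counts the elements satisfying condA, capped at 17 by the break
theorem goA_count (n s : Int) (l : List Int) (c : Int) (hc : c ≤ 16) :
    goA n s l c = min (c + l.countP (fun i => condA s n i)) 17 := by
  induction l generalizing c with
  | nil => simp [goA]; omega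
  | cons i rest ih =>
      by_cases h1 : PySem.Int.mod n i = 0
      · by_cases h2 : PySem.Int.floordiv n i > i ∧ PySem.Int.mod (PySem.Int.floordiv n i - i) 2 = 0 ∧
            PySem.Int.mod (PySem.Int.floordiv (PySem.Int.floordiv n i - i) 2) 2 = 1 ∧
            PySem.Int.mod (PySem.Int.floordiv n i + i) (2 * s) = 0 ∧
            PySem.Int.mod (PySem.Int.floordiv (PySem.Int.floordiv n i + i) (2 * s)) 2 = 1
        · by_cases h3 : PySem.Int.floordiv (PySem.Int.floordiv (PySem.Int.floordiv n i - i) 2 + 1) 2 > 1 ∧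
              PySem.Int.floordiv (PySem.Int.floordiv (PySem.Int.floordiv n i + i) (2 * s) + 1) 2 > 0 ∧
              PySem.Int.floordiv (PySem.Int.floordiv (PySem.Int.floordiv n i - i) 2 + 1) 2 < 10 ^ 99
          · have hcA : condA s n i = true := by unfold condA; simp only [decide_eq_true_eq]; tauto
            have hcnt : (i :: rest).countP (fun i => condA s n i) =
                rest.countP (fun i => condA s n i) + 1 := by
              simp [hcA]
            simp only [goA, if_pos h1, if_pos h2, if_pos h3, hcnt]
            by_cases h4 : c + 1 > 16
            · rw [if_pos h4]
              have : c = 16 := by omega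
              omega
            · rw [if_neg h4, ih (c + 1) (by omega)]
              push_cast
              omega
          · have hcA : ¬ condA s n i = true := by unfold condA; simp only [decide_eq_true_eq]; tauto
            have hcnt : (i :: rest).countP (fun i => condA s n i) =
                rest.countP (fun i => condA s n i) := by
              simp [hcA]
            simp only [goA, if_pos h1, if_pos h2, if_neg h3, hcnt]
            exact ih c hc
        · have hcA : ¬ condA s n i = true := by unfold condA; simp only [decide_eq_true_eq]; tauto
          have hcnt : (i :: rest).countP (fun i => condA s n i) =
              rest.countP (fun i => condA s n i) := by
            simp [hcA]
          simp only [goA, if_pos h1, if_neg h2, hcnt]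
          exact ih c hc
      · have hcA : ¬ condA s n i = true := by unfold condA; simp only [decide_eq_true_eq]; tauto
        have hcnt : (i :: rest).countP (fun i => condA s n i) =
            rest.countP (fun i => condA s n i) := by
          simp [hcA]
        simp only [goA, if_neg h1, hcnt]
        exact ih c hc

theorem condA_iff (s n i : Int) :
    condA s n i = true ↔ (i ∣ n ∧ condB s n i = true) := by
  have key : ∀ x : Int, (PySem.Int.mod x 2 = 0 ∧ PySem.Int.mod (PySem.Int.floordiv x 2) 2 = 1)
      ↔ PySem.Int.mod x 4 = 2 := by
    intro x
    rw [PySem.Int.floordiv_eq_ediv_of_pos (by omega : (0:Int) < 2),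
        PySem.Int.mod_eq_emod_of_pos (by omega : (0:Int) < 2),
        PySem.Int.mod_eq_emod_of_pos (by omega : (0:Int) < 2),
        PySem.Int.mod_eq_emod_of_pos (by omega : (0:Int) < 4)]
    omega
  unfold condA condB
  simp only [decide_eq_true_eq]
  rw [PySem.Int.mod_eq_zero_iff_dvd]
  have := key (PySem.Int.floordiv n i - i)
  tauto

-- product of the prime powers in a factor list
def prodL (L : List (Int × Int)) : Int := L.foldr (fun pe acc => pe.1 ^ pe.2.toNat * acc) 1

theorem prodL_cons (pe : Int × Int) (L : List (Int × Int)) :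
    prodL (pe :: L) = pe.1 ^ pe.2.toNat * prodL L := rfl

-- full postcondition of the inner strip loop, for any sufficient fuel
theorem stripGo_spec (p : Int) (hp : 2 ≤ p) : ∀ (fuel : Nat) (m : Int), 0 < m → m.toNat ≤ fuel →
    m = p ^ (stripGo p fuel m).1.toNat * (stripGo p fuel m).2 ∧ 0 < (stripGo p fuel m).2 ∧
    ¬ p ∣ (stripGo p fuel m).2 ∧ 0 ≤ (stripGo p fuel m).1 := by
  intro fuel
  induction fuel with
  | zero => intro m hm hf; omega
  | succ fuel ih =>
      intro m hm hf
      by_cases h : PySem.Int.mod m p = 0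
      · have hdvd : p ∣ m := (PySem.Int.mod_eq_zero_iff_dvd m p).mp h
        have he : PySem.Int.floordiv m p = m / p := PySem.Int.floordiv_eq_ediv_of_pos (by omega)
        have hpm : p ≤ m := Int.le_of_dvd hm hdvd
        have hq : 0 < m / p := by
          have h1 : p / p ≤ m / p := Int.ediv_le_ediv (by omega) hpm
          rwa [Int.ediv_self (by omega)] at h1
        have hlt : m / p < m := by
          rw [Int.ediv_lt_iff_lt_mul (by omega)]
          nlinarith
        have hfn : (m / p).toNat ≤ fuel := by omega
        rw [show stripGo p (fuel + 1) m =
            ((stripGo p fuel (PySem.Int.floordiv m p)).1 + 1, (stripGo p fuel (PySem.Int.floordiv m p)).2) from by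
          rw [stripGo, if_pos h]]
        rw [he]
        obtain ⟨ih1, ih2, ih3, ih4⟩ := ih (m / p) hq hfn
        have hmul : m / p * p = m := Int.ediv_mul_cancel hdvd
        refine ⟨?_, ih2, ih3, by simp only []; omega⟩
        simp only []
        rw [show ((stripGo p fuel (m / p)).1 + 1).toNat = (stripGo p fuel (m / p)).1.toNat + 1 by omega, pow_succ]
        calc m = m / p * p := hmul.symm
          _ = (p ^ (stripGo p fuel (m / p)).1.toNat * (stripGo p fuel (m / p)).2) * p := by rw [← ih1]
          _ = p ^ (stripGo p fuel (m / p)).1.toNat * p * (stripGo p fuel (m / p)).2 := by ring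
      · rw [stripGo, if_neg h]
        have h2 : ¬ p ∣ m := fun hd => h ((PySem.Int.mod_eq_zero_iff_dvd m p).mpr hd)
        simpa using ⟨hm, h2⟩

theorem stripP_spec (p : Int) (hp : 2 ≤ p) (m : Int) (hm : 0 < m) :
    m = p ^ (stripP p m).1.toNat * (stripP p m).2 ∧ 0 < (stripP p m).2 ∧
    ¬ p ∣ (stripP p m).2 ∧ 0 ≤ (stripP p m).1 :=
  stripGo_spec p hp m.toNat m hm (Nat.le_refl _)

-- the loop-exit branch: what remains is 1 or a single prime
theorem facExit_spec (m p : Int) (hm : 1 ≤ m) (hp : 2 ≤ p) (hmp : m < p * p)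
    (hinv : ∀ q : Int, 2 ≤ q → q < p → ¬ q ∣ m) :
    prodL (if 1 < m then [(m, 1)] else []) = m ∧
    (∀ pe ∈ (if 1 < m then [(m, 1)] else ([] : List (Int × Int))), Nat.Prime pe.1.toNat ∧ 2 ≤ pe.1 ∧ 1 ≤ pe.2) ∧
    (if 1 < m then [(m, 1)] else ([] : List (Int × Int))).Pairwise (fun a b => a.1 < b.1) ∧
    (∀ pe ∈ (if 1 < m then [(m, 1)] else ([] : List (Int × Int))), p ≤ pe.1) := by
  by_cases hm1 : 1 < m
  · rw [if_pos hm1]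
    have hpm : p ≤ m := by
      by_contra hpm
      exact hinv m (by omega) (by omega) dvd_rfl
    have hprime : Nat.Prime m.toNat := by
      by_contra hnp
      have h2 : 2 ≤ m.toNat := by omega
      have hmf := Nat.minFac_dvd m.toNat
      have hmfp : (m.toNat).minFac.Prime := Nat.minFac_prime (by omega)
      have hsq : (m.toNat).minFac * (m.toNat).minFac ≤ m.toNat := by
        have := Nat.minFac_sq_le_self (by omega) hnp
        nlinarith [this]
      set q : Int := ((m.toNat).minFac : Int) with hqdef
      have hq2 : 2 ≤ q := by
        have := hmfp.two_le; omega
      have hqd : q ∣ m := by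
        have := Int.natCast_dvd_natCast.mpr hmf
        rwa [Int.toNat_of_nonneg (by omega)] at this
      have hqm : q * q ≤ m := by
        have h5 : (q * q : Int) ≤ (m.toNat : Int) := by rw [hqdef]; exact_mod_cast hsq
        rwa [Int.toNat_of_nonneg (by omega)] at h5
      have hqp : q < p := by nlinarith [hqm, hmp, hq2, hp]
      exact hinv q hq2 hqp hqd
    refine ⟨?_, ?_, ?_, ?_⟩
    · rw [prodL_cons]; simp [prodL]
    · intro pe hpe
      rcases List.mem_cons.mp hpe with h | h
      · subst h; exact ⟨hprime, by omega, by omega⟩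
      · simp at h
    · simp
    · intro pe hpe
      rcases List.mem_cons.mp hpe with h | h
      · subst h; simp only []; omega
      · simp at h
  · rw [if_neg hm1]
    have : m = 1 := by omega
    subst this
    simp [prodL]

-- the trial-division loop returns the prime factorization, primes strictly increasing
theorem facGo_spec : ∀ (fuel : Nat) (m p : Int), 1 ≤ m → 2 ≤ p → (m + 1 - p).toNat ≤ fuel →
    (∀ q : Int, 2 ≤ q → q < p → ¬ q ∣ m) →
    prodL (facGo fuel m p) = m ∧
    (∀ pe ∈ facGo fuel m p, Nat.Prime pe.1.toNat ∧ 2 ≤ pe.1 ∧ 1 ≤ pe.2) ∧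
    (facGo fuel m p).Pairwise (fun a b => a.1 < b.1) ∧
    (∀ pe ∈ facGo fuel m p, p ≤ pe.1) := by
  intro fuel
  induction fuel with
  | zero =>
      intro m p hm hp hf hinv
      have hmp : m < p * p := by nlinarith [hf, hp, hm, (by omega : m + 1 ≤ p)]
      exact facExit_spec m p hm hp hmp hinv
  | succ fuel ih =>
      intro m p hm hp hf hinv
      by_cases hg : p * p ≤ m
      · have hple : p ≤ p * p := le_mul_of_one_le_left (by omega) (by omega)
        by_cases hmod : PySem.Int.mod m p = 0
        · have hdvd : p ∣ m := (PySem.Int.mod_eq_zero_iff_dvd m p).mp hmod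
          obtain ⟨hs1, hs2, hs3, hs4⟩ := stripP_spec p hp m (by omega)
          set e1 := (stripP p m).1 with he1
          set s2 := (stripP p m).2 with hs2'
          have hE : 1 ≤ e1 := by
            by_contra hE
            have h0 : e1.toNat = 0 := by omega
            rw [h0, pow_zero, one_mul] at hs1
            exact hs3 (hs1 ▸ hdvd)
          have hprime : Nat.Prime p.toNat := by
            rw [Nat.prime_def_lt]
            refine ⟨by omega, ?_⟩
            intro k hk hkd
            by_contra hk1
            have hk0 : k ≠ 0 := by rintro rfl; simp at hkd; omega
            have hcast : (k : Int) ∣ p := by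
              have := Int.natCast_dvd_natCast.mpr hkd
              rwa [Int.toNat_of_nonneg (by omega)] at this
            exact hinv k (by omega) (by omega) (hcast.trans hdvd)
          have hm2dvd : s2 ∣ m := ⟨p ^ e1.toNat, by rw [hs1]; ring⟩
          have hs2m : s2 ≤ m := Int.le_of_dvd (by omega) hm2dvd
          have hinv' : ∀ q : Int, 2 ≤ q → q < p + 1 → ¬ q ∣ s2 := by
            intro q hq2 hqp hqd
            rcases lt_or_eq_of_le (by omega : q ≤ p) with h | h
            · exact hinv q hq2 h (hqd.trans hm2dvd)
            · exact hs3 (h ▸ hqd)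
          obtain ⟨ih1, ih2, ih3, ih4⟩ := ih s2 (p + 1) (by omega) (by omega) (by omega) hinv'
          rw [show facGo (fuel + 1) m p = (p, e1) :: facGo fuel s2 (p + 1) from by
            rw [facGo, if_pos hg, if_pos hmod, ← he1, ← hs2']]
          refine ⟨?_, ?_, ?_, ?_⟩
          · rw [prodL_cons]
            simp only []
            rw [ih1]
            exact hs1.symm
          · intro pe hpe
            rcases List.mem_cons.mp hpe with h | h
            · subst h; exact ⟨hprime, by omega, hE⟩
            · exact ih2 pe h
          · exact List.Pairwise.cons (fun b hb => by have := ih4 b hb; simp only []; omega) ih3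
          · intro pe hpe
            rcases List.mem_cons.mp hpe with h | h
            · subst h; simp only []; omega
            · have := ih4 pe h; omega
        · have hnd : ¬ p ∣ m := fun hd => hmod ((PySem.Int.mod_eq_zero_iff_dvd m p).mpr hd)
          have hinv' : ∀ q : Int, 2 ≤ q → q < p + 1 → ¬ q ∣ m := by
            intro q hq2 hqp hqd
            rcases lt_or_eq_of_le (by omega : q ≤ p) with h | h
            · exact hinv q hq2 h hqd
            · exact hnd (h ▸ hqd)
          obtain ⟨ih1, ih2, ih3, ih4⟩ := ih m (p + 1) hm (by omega) (by omega) hinv'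
          rw [show facGo (fuel + 1) m p = facGo fuel m (p + 1) from by rw [facGo, if_pos hg, if_neg hmod]]
          exact ⟨ih1, ih2, ih3, fun pe hpe => by have := ih4 pe hpe; omega⟩
      · rw [show facGo (fuel + 1) m p = (if 1 < m then [(m, 1)] else []) from by rw [facGo, if_neg hg]]
        exact facExit_spec m p hm hp (by omega) hinv

theorem facLoop_spec (m p : Int) (hm : 1 ≤ m) (hp : 2 ≤ p)
    (hinv : ∀ q : Int, 2 ≤ q → q < p → ¬ q ∣ m) :
    prodL (facLoop m p) = m ∧
    (∀ pe ∈ facLoop m p, Nat.Prime pe.1.toNat ∧ 2 ≤ pe.1 ∧ 1 ≤ pe.2) ∧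
    (facLoop m p).Pairwise (fun a b => a.1 < b.1) ∧
    (∀ pe ∈ facLoop m p, p ≤ pe.1) :=
  facGo_spec (m + 1 - p).toNat m p hm hp (Nat.le_refl _) hinv

theorem intPrime_of (p : Int) (h2 : 2 ≤ p) (hp : Nat.Prime p.toNat) : Prime p := by
  rw [Int.prime_iff_natAbs_prime]
  have h : p.natAbs = p.toNat := by omega
  rwa [h]

-- if p is prime and p ∤ i, then i ∣ X * p forces i ∣ X
theorem dvd_down (p X i : Int) (hp : Prime p) (hi : ¬ p ∣ i) (h : i ∣ X * p) : i ∣ X := by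
  obtain ⟨t, ht⟩ := h
  have hpt : p ∣ i * t := ⟨X, by rw [← ht]; ring⟩
  rcases hp.dvd_mul.mp hpt with h' | h'
  · exact absurd h' hi
  · obtain ⟨t', rfl⟩ := h'
    refine ⟨t', mul_left_cancel₀ hp.ne_zero ?_⟩
    rw [show p * X = X * p by ring, ht]; ring

-- every positive divisor of M * p^E splits as (divisor of M) * p^k, k ≤ E
theorem mem_split (p M : Int) (hp : Prime p) (hppos : 0 < p) :
    ∀ (E : Nat) (i : Int), 0 < i → i ∣ M * p ^ E →
      ∃ d k, 0 < d ∧ d ∣ M ∧ k ≤ E ∧ i = d * p ^ k := by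
  intro E
  induction E with
  | zero =>
      intro i h0 hd
      exact ⟨i, 0, h0, by simpa using hd, Nat.le_refl 0, by ring⟩
  | succ E ih =>
      intro i h0 hd
      by_cases hpi : p ∣ i
      · obtain ⟨i', rfl⟩ := hpi
        have hi' : 0 < i' := by nlinarith [h0, hppos]
        have hstep : i' ∣ M * p ^ E := by
          have h1 : i' * p ∣ (M * p ^ E) * p := by
            rw [show i' * p = p * i' by ring, show M * p ^ E * p = M * p ^ (E + 1) by rw [pow_succ]; ring]
            exact hd
          exact (mul_dvd_mul_iff_right (by omega : p ≠ 0)).mp h1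
        obtain ⟨d, k, hd0, hdM, hkE, hik⟩ := ih i' hi' hstep
        exact ⟨d, k + 1, hd0, hdM, by omega, by rw [pow_succ, hik]; ring⟩
      · have hstep : i ∣ M * p ^ E :=
          dvd_down p (M * p ^ E) i hp hpi (by rw [show M * p ^ E * p = M * p ^ (E + 1) by rw [pow_succ]; ring]; exact hd)
        obtain ⟨d, k, hd0, hdM, hkE, hik⟩ := ih i h0 hstep
        exact ⟨d, k, hd0, hdM, by omega, hik⟩

-- uniqueness of that splitting
theorem split_uniq (p : Int) (hppos : 0 < p) :
    ∀ (k1 : Nat) (d1 d2 : Int) (k2 : Nat), ¬ p ∣ d1 → ¬ p ∣ d2 →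
      d1 * p ^ k1 = d2 * p ^ k2 → d1 = d2 ∧ k1 = k2 := by
  intro k1
  induction k1 with
  | zero =>
      intro d1 d2 k2 h1 h2 heq
      cases k2 with
      | zero => simpa using heq
      | succ k2' =>
          exfalso
          apply h1
          rw [pow_zero, mul_one] at heq
          exact ⟨d2 * p ^ k2', by rw [heq, pow_succ]; ring⟩
  | succ k1' ih =>
      intro d1 d2 k2 h1 h2 heq
      cases k2 with
      | zero =>
          exfalso
          apply h2
          rw [pow_zero, mul_one] at heq
          exact ⟨d1 * p ^ k1', by rw [← heq, pow_succ]; ring⟩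
      | succ k2' =>
          have heq' : d1 * p ^ k1' = d2 * p ^ k2' := by
            apply mul_right_cancel₀ (by omega : p ≠ 0)
            rw [show d1 * p ^ k1' * p = d1 * p ^ (k1' + 1) by rw [pow_succ]; ring,
                show d2 * p ^ k2' * p = d2 * p ^ (k2' + 1) by rw [pow_succ]; ring]
            exact heq
          obtain ⟨hd, hk⟩ := ih d1 d2 k2' h1 h2 heq'
          exact ⟨hd, by omega⟩

-- nodup of a flatMap with nodup pieces and pairwise-disjoint images
theorem nodup_flatMap' (l : List Int) (f : Int → List Int)
    (h1 : ∀ x ∈ l, (f x).Nodup)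
    (h2 : l.Pairwise (fun a b => ∀ y ∈ f a, y ∉ f b)) :
    (l.flatMap f).Nodup := by
  induction l with
  | nil => simp
  | cons x xs ih =>
      simp only [List.flatMap_cons]
      rw [List.nodup_append]
      obtain ⟨hx, hxs⟩ := List.pairwise_cons.mp h2
      refine ⟨h1 x (by simp), ih (fun y hy => h1 y (by simp [hy])) hxs, ?_⟩
      intro a ha b hb heq
      obtain ⟨y, hy, hby⟩ := List.mem_flatMap.mp hb
      exact hx y hy a ha (heq ▸ hby)

theorem mem_divsStep (acc : List Int) (p e i : Int) :
    i ∈ divsStep acc (p, e) ↔ ∃ d ∈ acc, ∃ k : Int, 0 ≤ k ∧ k < e + 1 ∧ i = d * p ^ k.toNat := by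
  simp only [divsStep, List.mem_flatMap, List.mem_map, PySem.List.mem_pyRange_one]
  constructor
  · rintro ⟨d, hd, k, ⟨hk0, hk1⟩, rfl⟩
    exact ⟨d, hd, k, hk0, hk1, rfl⟩
  · rintro ⟨d, hd, k, hk0, hk1, rfl⟩
    exact ⟨d, hd, k, ⟨hk0, hk1⟩, rfl⟩

-- the divisor-building fold: nodup, and members are exactly the positive divisors
theorem foldDivs_spec : ∀ (L : List (Int × Int)) (M : Int) (acc : List Int),
    0 < M →
    acc.Nodup → (∀ i : Int, i ∈ acc ↔ 0 < i ∧ i ∣ M) →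
    (∀ pe ∈ L, Nat.Prime pe.1.toNat ∧ 2 ≤ pe.1 ∧ 1 ≤ pe.2 ∧ ¬ pe.1 ∣ M) →
    L.Pairwise (fun a b => a.1 ≠ b.1) →
    (L.foldl divsStep acc).Nodup ∧
    (∀ i : Int, i ∈ L.foldl divsStep acc ↔ 0 < i ∧ i ∣ M * prodL L) := by
  intro L
  induction L with
  | nil =>
      intro M acc hM hnd hmem hinv hpw
      simp only [List.foldl_nil]
      refine ⟨hnd, fun i => ?_⟩
      rw [hmem i]
      simp [prodL]
  | cons pe L ih =>
      intro M acc hM hnd hmem hinv hpw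
      obtain ⟨p, e⟩ := pe
      obtain ⟨hprime, hp2, he1, hpM⟩ := hinv (p, e) (by simp)
      simp only [] at hprime hp2 he1 hpM
      have hpInt : Prime p := intPrime_of p hp2 hprime
      have hpE : (0:Int) < p ^ e.toNat := by positivity
      have hM' : 0 < M * p ^ e.toNat := by positivity
      have hmem' : ∀ i : Int, i ∈ divsStep acc (p, e) ↔ 0 < i ∧ i ∣ M * p ^ e.toNat := by
        intro i
        rw [mem_divsStep]
        constructor
        · rintro ⟨d, hd, k, hk0, hk1, rfl⟩
          obtain ⟨hd0, hdM⟩ := (hmem d).mp hd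
          exact ⟨by positivity, mul_dvd_mul hdM (pow_dvd_pow p (by omega))⟩
        · rintro ⟨h0, hdvd⟩
          obtain ⟨d, k, hd0, hdM, hkE, rfl⟩ := mem_split p M hpInt (by omega) e.toNat i h0 hdvd
          exact ⟨d, (hmem d).mpr ⟨hd0, hdM⟩, (k : Int), by omega, by omega, by simp⟩
      have hdisj : ∀ d1 d2 : Int, d1 ∈ acc → d2 ∈ acc → d1 ≠ d2 →
          ∀ y ∈ (PySem.List.pyRange 0 (e + 1) 1).map (fun k => d1 * p ^ k.toNat),
            y ∉ (PySem.List.pyRange 0 (e + 1) 1).map (fun k => d2 * p ^ k.toNat) := by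
        intro d1 d2 hd1 hd2 hne y hy1 hy2
        simp only [List.mem_map] at hy1 hy2
        obtain ⟨k1, -, rfl⟩ := hy1
        obtain ⟨k2, -, hk2⟩ := hy2
        obtain ⟨h10, h1M⟩ := (hmem d1).mp hd1
        obtain ⟨h20, h2M⟩ := (hmem d2).mp hd2
        have hnp1 : ¬ p ∣ d1 := fun hc => hpM (hc.trans h1M)
        have hnp2 : ¬ p ∣ d2 := fun hc => hpM (hc.trans h2M)
        obtain ⟨heq, -⟩ := split_uniq p (by omega) k2.toNat d2 d1 k1.toNat hnp2 hnp1 hk2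
        exact hne heq.symm
      have hnd' : (divsStep acc (p, e)).Nodup := by
        apply nodup_flatMap'
        · intro d hd
          obtain ⟨hd0, hdM⟩ := (hmem d).mp hd
          apply List.Nodup.map_on
          · intro k1 hk1 k2 hk2 hkeq
            rw [PySem.List.mem_pyRange_one] at hk1 hk2
            have hcan := mul_left_cancel₀ (by omega : d ≠ 0) hkeq
            have hinj : k1.toNat = k2.toNat := by
              by_contra hne
              rcases Nat.lt_or_ge k1.toNat k2.toNat with h | h
              · exact absurd hcan (ne_of_lt (pow_lt_pow_right₀ (by omega) h))
              · have h' : k2.toNat < k1.toNat := by omega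
                exact absurd hcan.symm (ne_of_lt (pow_lt_pow_right₀ (by omega) h'))
            omega
          · exact PySem.List.nodup_pyRange_one 0 ((p, e).2 + 1)
        · exact List.Pairwise.imp_of_mem (fun {a b} ha hb h => hdisj a b ha hb h) hnd
      have hinv' : ∀ pe' ∈ L, Nat.Prime pe'.1.toNat ∧ 2 ≤ pe'.1 ∧ 1 ≤ pe'.2 ∧ ¬ pe'.1 ∣ M * p ^ e.toNat := by
        intro pe' hpe'
        obtain ⟨hq1, hq2, hq3, hq4⟩ := hinv pe' (by simp [hpe'])
        refine ⟨hq1, hq2, hq3, ?_⟩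
        intro hqd
        have hqInt : Prime pe'.1 := intPrime_of pe'.1 hq2 hq1
        rcases hqInt.dvd_mul.mp hqd with h | h
        · exact hq4 h
        · have hqp : pe'.1 ∣ p := hqInt.dvd_of_dvd_pow h
          have hnatd : pe'.1.toNat ∣ p.toNat := by
            have hnn := Int.natAbs_dvd_natAbs.mpr hqp
            rwa [show pe'.1.natAbs = pe'.1.toNat by omega, show p.natAbs = p.toNat by omega] at hnn
          rcases Nat.Prime.eq_one_or_self_of_dvd hprime _ hnatd with h' | h'
          · omega
          · have heqp : pe'.1 = p := by omega
            have hne : p ≠ pe'.1 := by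
              have := List.rel_of_pairwise_cons hpw hpe'
              simpa using this
            exact hne heqp.symm
      have hpw' : L.Pairwise (fun a b => a.1 ≠ b.1) := hpw.of_cons
      obtain ⟨ha, hb⟩ := ih (M * p ^ e.toNat) (divsStep acc (p, e)) hM' hnd' hmem' hinv' hpw'
      rw [List.foldl_cons]
      refine ⟨ha, fun i => ?_⟩
      rw [hb i, prodL_cons]
      constructor
      · rintro ⟨h0, hdvd⟩
        exact ⟨h0, by rw [show M * (p ^ e.toNat * prodL L) = M * p ^ e.toNat * prodL L by ring]; exact hdvd⟩
      · rintro ⟨h0, hdvd⟩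
        exact ⟨h0, by rw [show M * p ^ e.toNat * prodL L = M * (p ^ e.toNat * prodL L) by ring]; exact hdvd⟩

-- B's counting fold is a countP of condB
theorem foldB_count (s n : Int) (l : List Int) (c : Int) :
    l.foldl (fun c i =>
      let j := PySem.Int.floordiv n i
      if j > i ∧ PySem.Int.mod (j - i) 4 = 2 ∧ PySem.Int.mod (j + i) (2 * s) = 0 ∧
          PySem.Int.mod (PySem.Int.floordiv (j + i) (2 * s)) 2 = 1 then
        let x := PySem.Int.floordiv (j - i) 2
        let y := PySem.Int.floordiv (j + i) (2 * s)
        let b := PySem.Int.floordiv (x + 1) 2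
        let a := PySem.Int.floordiv (y + 1) 2
        if b > 1 ∧ a > 0 ∧ b < 10 ^ 99 then c + 1 else c
      else c) c
    = c + l.countP (fun i => condB s n i) := by
  induction l generalizing c with
  | nil => simp
  | cons i rest ih =>
      rw [List.foldl_cons, List.countP_cons]
      by_cases h1 : PySem.Int.floordiv n i > i ∧ PySem.Int.mod (PySem.Int.floordiv n i - i) 4 = 2 ∧
          PySem.Int.mod (PySem.Int.floordiv n i + i) (2 * s) = 0 ∧
          PySem.Int.mod (PySem.Int.floordiv (PySem.Int.floordiv n i + i) (2 * s)) 2 = 1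
      · by_cases h2 : PySem.Int.floordiv (PySem.Int.floordiv (PySem.Int.floordiv n i - i) 2 + 1) 2 > 1 ∧
            PySem.Int.floordiv (PySem.Int.floordiv (PySem.Int.floordiv n i + i) (2 * s) + 1) 2 > 0 ∧
            PySem.Int.floordiv (PySem.Int.floordiv (PySem.Int.floordiv n i - i) 2 + 1) 2 < 10 ^ 99
        · have hcB : condB s n i = true := by unfold condB; simp only [decide_eq_true_eq]; tauto
          rw [if_pos h1, if_pos h2, if_pos hcB, ih]
          push_cast
          omega
        · have hcB : ¬ condB s n i = true := by unfold condB; simp only [decide_eq_true_eq]; tauto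
          rw [if_pos h1, if_neg h2, if_neg hcB, ih]
          push_cast
          omega
      · have hcB : ¬ condB s n i = true := by unfold condB; simp only [decide_eq_true_eq]; tauto
        rw [if_neg h1, if_neg hcB, ih]
        push_cast
        omega

-- a qualifying divisor lies below the integer square root
theorem sqrt_bound (n i : Int) (hn : 0 < n) (hi : 0 < i) (hdvd : i ∣ n)
    (hlt : i < PySem.Int.floordiv n i) : i ≤ (Nat.sqrt n.toNat : Int) := by
  rw [PySem.Int.floordiv_eq_ediv_of_pos hi] at hlt
  have hmul : i * (n / i) = n := Int.mul_ediv_cancel' hdvd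
  have hsq : i * i < n := by nlinarith
  have hcast : i.toNat * i.toNat ≤ n.toNat := by
    have h1 : ((i.toNat * i.toNat : Nat) : Int) ≤ (n.toNat : Int) := by
      push_cast
      rw [Int.toNat_of_nonneg (by omega : (0:Int) ≤ i), Int.toNat_of_nonneg (by omega : (0:Int) ≤ n)]
      omega
    exact_mod_cast h1
  have hle : i.toNat ≤ Nat.sqrt n.toNat := Nat.le_sqrt.mpr hcast
  omega

-- the divisor list built by B: nodup, members are exactly the positive divisors of n
theorem divs_spec (n : Int) (hn : 1 ≤ n) :
    ((facLoop n 2).foldl divsStep [1]).Nodup ∧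
    (∀ i : Int, i ∈ (facLoop n 2).foldl divsStep [1] ↔ 0 < i ∧ i ∣ n) := by
  obtain ⟨hf1, hf2, hf3, hf4⟩ := facLoop_spec n 2 (by omega) (by omega)
    (fun q h1 h2 => absurd h1 (by omega))
  have hmem1 : ∀ i : Int, i ∈ ([1] : List Int) ↔ 0 < i ∧ i ∣ 1 := by
    intro i
    constructor
    · intro h
      simp at h
      subst h
      exact ⟨by omega, dvd_rfl⟩
    · rintro ⟨h0, hd⟩
      rcases Int.isUnit_iff.mp (isUnit_of_dvd_one hd) with h | h <;> simp [h]
      omega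
  have hinv : ∀ pe ∈ facLoop n 2, Nat.Prime pe.1.toNat ∧ 2 ≤ pe.1 ∧ 1 ≤ pe.2 ∧ ¬ pe.1 ∣ 1 := by
    intro pe hpe
    obtain ⟨h1, h2, h3⟩ := hf2 pe hpe
    refine ⟨h1, h2, h3, ?_⟩
    intro hd
    have := Int.le_of_dvd one_pos hd
    omega
  have hpw : (facLoop n 2).Pairwise (fun a b => a.1 ≠ b.1) := hf3.imp (fun h => ne_of_lt h)
  obtain ⟨ha, hb⟩ := foldDivs_spec (facLoop n 2) 1 [1] one_pos (by simp) hmem1 hinv hpw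
  refine ⟨ha, fun i => ?_⟩
  rw [hb i, one_mul, hf1]

-- capped counter comparison
theorem min17_beq (c : Int) : (min c 17 == (16:Int)) = (c == 16) := by
  rw [Bool.eq_iff_iff, beq_iff_eq, beq_iff_eq]
  omega

-- ===== VERDICT (by name: the statement is the Claim_ definition above) =====
theorem count_sols_squareD_spec : Claim_equal_count_sols_squareD := by
  unfold Claim_equal_count_sols_squareD
  intro d n _hdom hpre
  obtain ⟨hd1, hn0⟩ := hpre
  unfold Spec_count_sols_squareD count_sols_squareD count_sols_squareD_alt
  simp only []
  set s : Int := if d - (Nat.sqrt d.toNat : Int) * (Nat.sqrt d.toNat : Int) ≤ (Nat.sqrt d.toNat : Int)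
    then ((Nat.sqrt d.toNat : Int)) else ((Nat.sqrt d.toNat : Int)) + 1 with hs
  by_cases hn : n ≤ 0
  · rw [if_pos hn]
    have hn' : n = 0 := by omega
    subst hn'
    have hz : ((0:Int).toNat) = 0 := rfl
    rw [hz, Nat.sqrt_zero]
    norm_num
    rw [show ((2:Int)) = 1 + 1 by norm_num, PySem.List.pyRange_one_singleton]
    rw [goA_count 0 _ [1] 0 (by omega)]
    have hA1 : ¬ condA s 0 1 = true := by
      unfold condA
      simp only [decide_eq_true_eq]
      rintro ⟨-, hgt, -⟩
      rw [PySem.Int.floordiv_eq_ediv_of_pos (by omega : (0:Int) < 1)] at hgt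
      norm_num at hgt
    simp [hA1]
  · rw [if_neg hn]
    have hn1 : 1 ≤ n := by omega
    obtain ⟨hndD, hmemD⟩ := divs_spec n hn1
    rw [foldB_count s n _ 0, goA_count n s _ 0 (by omega)]
    have hcnt : (PySem.List.pyRange 1 ((Nat.sqrt n.toNat : Int) + 2) 1).countP (fun i => condA s n i)
        = ((facLoop n 2).foldl divsStep [1]).countP (fun i => condB s n i) := by
      rw [List.countP_eq_length_filter, List.countP_eq_length_filter]
      apply List.Perm.length_eq
      rw [List.perm_ext_iff_of_nodup (List.Nodup.filter _ (PySem.List.nodup_pyRange_one _ _))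
        (List.Nodup.filter _ hndD)]
      intro i
      simp only [List.mem_filter, PySem.List.mem_pyRange_one]
      constructor
      · rintro ⟨⟨h1, h2⟩, hA⟩
        obtain ⟨hdvd, hB⟩ := (condA_iff s n i).mp hA
        exact ⟨(hmemD i).mpr ⟨by omega, hdvd⟩, hB⟩
      · rintro ⟨hmem, hB⟩
        obtain ⟨h0, hdvd⟩ := (hmemD i).mp hmem
        have hBgt : i < PySem.Int.floordiv n i := by
          have hB' := hB
          unfold condB at hB'
          simp only [decide_eq_true_eq] at hB'
          exact hB'.1
        have hbnd := sqrt_bound n i (by omega) h0 hdvd hBgt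
        exact ⟨⟨by omega, by omega⟩, (condA_iff s n i).mpr ⟨hdvd, hB⟩⟩
    rw [hcnt]
    simp only [zero_add]
    exact min17_beq _
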